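-- pv_equiv track=rewrite | github.com/jaegook/SER-ML | wav_stats.py | get_label_bins
-- ===== SOURCE A (Python) =====
-- def get_label_bins(data_list):
--    dict = {}
--    for file in data_list:
--       emotion = file.split("_")[2]
--       if emotion in dict:
--          dict[emotion] += 1
--       else:
--          dict[emotion] = 1
--    return dict
-- ===== SOURCE B (Python) =====
-- def get_label_bins(data_list):
--     emotions = [file.split("_")[2] for file in data_list]
--     return {label: emotions.count(label) for label in dict.fromkeys(emotions)}
-- ===== Notes on version B (the rewrite author's own statement) =====
-- stated objective: simpler
-- what changed: Replaces the single-pass dict-accumulating histogram with extract-all-labels, ordered dedup via dict.fromkeys, then one count per distinct label.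
import Mathlib
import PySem

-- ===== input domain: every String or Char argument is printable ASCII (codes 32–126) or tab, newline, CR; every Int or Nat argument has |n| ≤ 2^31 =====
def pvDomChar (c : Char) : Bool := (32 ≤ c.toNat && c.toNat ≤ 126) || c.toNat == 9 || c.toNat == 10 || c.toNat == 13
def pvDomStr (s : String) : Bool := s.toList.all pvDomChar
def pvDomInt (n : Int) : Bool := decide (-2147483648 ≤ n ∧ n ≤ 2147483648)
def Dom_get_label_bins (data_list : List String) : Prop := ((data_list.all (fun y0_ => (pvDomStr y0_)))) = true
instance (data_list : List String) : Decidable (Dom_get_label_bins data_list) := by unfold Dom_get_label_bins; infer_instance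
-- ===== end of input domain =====

-- B replaces A's one-pass dict-accumulating histogram by extract labels / ordered dedup / count
-- per distinct label (objective: simpler). Equivalence on every file list whose names split
-- into at least three '_'-separated pieces (elsewhere A raises IndexError).

-- ===== PORT A =====
-- one loop, a dict incremented in place; file.split("_")[2] via splitOn + pyGet?
-- (pyGet? = none is Python's IndexError; excluded by Pre_, the fold leaves the dict unchanged there)
def get_label_bins (data_list : List String) : List (String × Int) :=
  (data_list.foldl
    (fun (d : PySem.Dict String Int) file =>
      match PySem.List.pyGet? (((PySem.Str.split? file "_").getD [])) 2 with
      | none => d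
      | some emotion =>
          if d.contains emotion then d.insert emotion (d.getD emotion 0 + 1)
          else d.insert emotion 1)
    PySem.Dict.empty).items

-- ===== PORT B =====
-- emotions = [file.split("_")[2] …]; dict.fromkeys = PySem.List.dedup; one count per key
-- ((pyGet? …).getD "" is the total form; Pre_ guarantees the index is in range)
def get_label_bins_alt (data_list : List String) : List (String × Int) :=
  let emotions := data_list.map
    (fun file => (PySem.List.pyGet? (((PySem.Str.split? file "_").getD [])) 2).getD "")
  (PySem.List.dedup emotions).map (fun k => (k, (emotions.count k : Int)))

-- ===== PRECONDITION & SPEC =====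
-- excludes exactly the inputs on which A raises IndexError: a filename with fewer than two '_'
def Pre_get_label_bins (data_list : List String) : Prop :=
  ∀ f ∈ data_list, 3 ≤ (PySem.Chars.splitOn f.toList ['_']).length
instance (data_list : List String) : Decidable (Pre_get_label_bins data_list) := by
  unfold Pre_get_label_bins; infer_instance
def pvWitness_get_label_bins : List String := ["ang_F_sad.wav"]

def Spec_get_label_bins (data_list : List String) (out : List (String × Int)) : Prop := out = get_label_bins_alt data_list
instance (data_list : List String) (out : List (String × Int)) : Decidable (Spec_get_label_bins data_list out) := by unfold Spec_get_label_bins; infer_instance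

-- ===== CLAIM (what is proved, stated in full; the proofs are below) =====
def Claim_equal_get_label_bins : Prop := ∀ (data_list : List String), Dom_get_label_bins data_list → Pre_get_label_bins data_list → Spec_get_label_bins data_list (get_label_bins data_list)

-- ===== LEMMAS AND PROOFS =====

-- Pre_'s char-level split bounds the string-level split the ports use
theorem pvSplitLen (f : String) (h : 3 ≤ (PySem.Chars.splitOn f.toList ['_']).length) :
    3 ≤ (((PySem.Str.split? f "_").getD [])).length := by
  have hb := PySem.Str.split?_map f "_"
  cases hs : PySem.Str.split? f "_" with
  | none => rw [hs] at hb; simp [PySem.Chars.split?] at hb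
  | some l =>
      rw [hs] at hb
      simp [PySem.Chars.split?] at hb
      have hl := congrArg List.length hb
      simp at hl
      simp; omega

-- the label a file contributes (total form used by B's port)
def pvEm (f : String) : String :=
  (PySem.List.pyGet? (((PySem.Str.split? f "_").getD [])) 2).getD ""

-- Under Pre_, A's fold is the unconditional 'd[e] = d.get(e,0)+1' fold over the label list.
theorem pvFoldA_eq (l : List String)
    (h : ∀ f ∈ l, 3 ≤ (((PySem.Str.split? f "_").getD [])).length)
    (d : PySem.Dict String Int) :
    l.foldl
      (fun (d : PySem.Dict String Int) file =>
        match PySem.List.pyGet? (((PySem.Str.split? file "_").getD [])) 2 with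
        | none => d
        | some emotion =>
            if d.contains emotion then d.insert emotion (d.getD emotion 0 + 1)
            else d.insert emotion 1)
      d
    = (l.map pvEm).foldl (fun d e => d.insert e (d.getD e 0 + 1)) d := by
  induction l generalizing d with
  | nil => rfl
  | cons f t ih =>
    have hf : 3 ≤ (((PySem.Str.split? f "_").getD [])).length := h f (by simp)
    have hs : PySem.List.pyGet? (((PySem.Str.split? f "_").getD [])) 2
        = some (((PySem.Str.split? f "_").getD []))[2] := by
      exact_mod_cast PySem.List.pyGet?_ofNat _ 2 (by omega)
    simp only [List.foldl_cons, List.map_cons, hs, pvEm]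
    have hstep :
        (if d.contains (((PySem.Str.split? f "_").getD []))[2] then
           d.insert (((PySem.Str.split? f "_").getD []))[2]
             (d.getD (((PySem.Str.split? f "_").getD []))[2] 0 + 1)
         else d.insert (((PySem.Str.split? f "_").getD []))[2] 1)
        = d.insert (((PySem.Str.split? f "_").getD []))[2]
            (d.getD (((PySem.Str.split? f "_").getD []))[2] 0 + 1) := by
      by_cases hc : d.contains (((PySem.Str.split? f "_").getD []))[2]
      · simp [hc]
      · have h0 : d.getD (((PySem.Str.split? f "_").getD []))[2] 0 = 0 :=
          PySem.Dict.getD_of_not_contains d 0 (by simpa using hc)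
        simp [hc, h0]
    rw [hstep]
    exact ih (fun g hg => h g (by simp [hg])) _

-- ===== VERDICT (by name: the statement is the Claim_ definition above) =====
theorem get_label_bins_spec : Claim_equal_get_label_bins := by
  intro data_list _ hpre
  unfold Spec_get_label_bins get_label_bins get_label_bins_alt
  rw [pvFoldA_eq data_list (fun f hf => pvSplitLen f (hpre f hf))]
  rw [PySem.Dict.foldl_insert_getD_add_one_eq_counter]
  rw [PySem.Dict.items_counter]
  simp only [pvEm, PySem.List.dedup_eq_ofList]
  rfl
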